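-- pv_equiv track=rewrite | github.com/WiktorHawrylik/pyha-template | .agents/skills/license-audit/scripts/summarize_license_audit.py | resolve_review_rows
-- ===== SOURCE A (Python) =====
-- from typing import Final
--
-- APPROVED_REVIEW_DECISIONS: Final[set[str]] = {"ALLOW", "APPROVE", "APPROVED"}
--
-- def normalize_match_field(value: str) -> str:
--     """Normalize CSV fields used for review-decision matching."""
--     return value.strip().casefold()
--
-- def decision_matches_review(
--     decision: dict[str, str],
--     review_row: dict[str, str],
-- ) -> bool:
--     """Return whether a documented decision resolves a review row.
--
--     Name must match exactly (case-insensitive). Version and license fields may be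
--     left blank in the decision file to cover any matching version or license text.
--     """
--     if normalize_match_field(decision.get("Name", "")) != normalize_match_field(review_row.get("Name", "")):
--         return False
--
--     decision_version = normalize_match_field(decision.get("Version", ""))
--     if decision_version and decision_version != normalize_match_field(review_row.get("Version", "")):
--         return False
--
--     decision_license = normalize_match_field(decision.get("License", ""))
--     if decision_license and decision_license != normalize_match_field(review_row.get("License", "")):
--         return False
--
--     return decision.get("Decision", "").strip().upper() in APPROVED_REVIEW_DECISIONS
--
-- def resolve_review_rows(
--     review_rows: list[dict[str, str]],
--     review_decisions: list[dict[str, str]],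
-- ) -> tuple[list[dict[str, str]], list[dict[str, str]]]:
--     """Split review rows into documented and unresolved sets."""
--     resolved: list[dict[str, str]] = []
--     unresolved: list[dict[str, str]] = []
--
--     for review_row in review_rows:
--         if any(decision_matches_review(decision, review_row) for decision in review_decisions):
--             resolved.append(review_row)
--         else:
--             unresolved.append(review_row)
--
--     return resolved, unresolved
-- ===== SOURCE B (Python) =====
-- from typing import Final
--
-- APPROVED_REVIEW_DECISIONS: Final[set[str]] = {"ALLOW", "APPROVE", "APPROVED"}
--
-- def normalize_match_field(value: str) -> str:
--     """Normalize CSV fields used for review-decision matching."""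
--     return value.strip().casefold()
--
-- def resolve_review_rows(
--     review_rows: list[dict[str, str]],
--     review_decisions: list[dict[str, str]],
-- ) -> tuple[list[dict[str, str]], list[dict[str, str]]]:
--     """Split review rows into documented and unresolved sets."""
--     # Stage 1: index the approved decisions by normalized name; each entry keeps
--     # its (possibly blank = wildcard) normalized version/license constraints.
--     rules: dict[str, list[tuple[str, str]]] = {}
--     for key, rule in (
--         (
--             normalize_match_field(d.get("Name", "")),
--             (
--                 normalize_match_field(d.get("Version", "")),
--                 normalize_match_field(d.get("License", "")),
--             ),
--         )
--         for d in review_decisions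
--         if d.get("Decision", "").strip().upper() in APPROVED_REVIEW_DECISIONS
--     ):
--         rules.setdefault(key, []).append(rule)
--
--     # Stage 2: one pass over the rows; only rules filed under the row's
--     # normalized name are consulted.
--     resolved: list[dict[str, str]] = []
--     unresolved: list[dict[str, str]] = []
--     for row in review_rows:
--         ver = normalize_match_field(row.get("Version", ""))
--         lic = normalize_match_field(row.get("License", ""))
--         candidates = rules.get(normalize_match_field(row.get("Name", "")), [])
--         if any((not rv or rv == ver) and (not rl or rl == lic) for rv, rl in candidates):
--             resolved.append(row)
--         else:
--             unresolved.append(row)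
--     return resolved, unresolved
-- ===== Notes on version B (the rewrite author's own statement) =====
-- stated objective: faster
-- what changed: Replaces A's row-outer any() over all decisions with a two-stage pipeline: a dict index from normalized name to the approved decisions' (version, license) wildcard constraints is built once, then a single pass over the rows consults only the rules filed under each row's normalized name.
import Mathlib
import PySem

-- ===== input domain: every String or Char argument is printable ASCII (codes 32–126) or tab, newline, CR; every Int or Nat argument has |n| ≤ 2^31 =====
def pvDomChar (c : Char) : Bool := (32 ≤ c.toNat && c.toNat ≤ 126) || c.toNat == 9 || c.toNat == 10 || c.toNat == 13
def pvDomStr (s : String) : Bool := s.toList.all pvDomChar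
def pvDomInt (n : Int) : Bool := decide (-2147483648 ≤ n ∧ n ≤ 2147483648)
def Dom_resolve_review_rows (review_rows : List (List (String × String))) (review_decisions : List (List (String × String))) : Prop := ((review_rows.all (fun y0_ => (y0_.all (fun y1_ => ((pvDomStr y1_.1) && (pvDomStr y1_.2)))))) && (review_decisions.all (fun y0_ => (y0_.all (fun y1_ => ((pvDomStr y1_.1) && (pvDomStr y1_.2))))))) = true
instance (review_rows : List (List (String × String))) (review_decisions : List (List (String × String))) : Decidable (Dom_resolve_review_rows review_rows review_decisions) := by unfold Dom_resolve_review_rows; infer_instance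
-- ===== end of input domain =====

-- B builds a dict index from normalized name to the approved decisions' (version, license)
-- wildcard constraints once, then partitions the rows in one pass consulting only the rules
-- filed under each row's normalized name (alternative decomposition; return value proved equal).


-- ===== PORT A =====
-- normalize_match_field; .casefold() is ported as lower — exact on the ASCII domain (Dom)
def pvNormalizeMatchField (value : String) : String := PySem.Str.lower (PySem.Str.strip value)

-- decision_matches_review, ported step for step
def pvDecisionMatchesReview (decision review_row : PySem.Dict String String) : Bool :=
  if pvNormalizeMatchField (decision.getD "Name" "") != pvNormalizeMatchField (review_row.getD "Name" "") then
    false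
  else
    let decision_version := pvNormalizeMatchField (decision.getD "Version" "")
    if (decision_version != "") && (decision_version != pvNormalizeMatchField (review_row.getD "Version" "")) then
      false
    else
      let decision_license := pvNormalizeMatchField (decision.getD "License" "")
      if (decision_license != "") && (decision_license != pvNormalizeMatchField (review_row.getD "License" "")) then
        false
      else
        (["ALLOW", "APPROVE", "APPROVED"] : PySem.Set String).contains
          (PySem.Str.upper (PySem.Str.strip (decision.getD "Decision" "")))

-- row-outer loop with an inner any() over decisions
def resolve_review_rows (review_rows : List (List (String × String))) (review_decisions : List (List (String × String))) : (List (List (String × String))) × (List (List (String × String))) :=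
  let rows := review_rows.map PySem.Dict.ofList       -- the dict arguments, under the assoc-list convention
  let decisions := review_decisions.map PySem.Dict.ofList
  rows.foldl
    (fun (st : List (List (String × String)) × List (List (String × String))) review_row =>
      if decisions.any (fun decision => pvDecisionMatchesReview decision review_row) then
        (st.1 ++ [review_row.items], st.2)
      else
        (st.1, st.2 ++ [review_row.items]))
    ([], [])

-- ===== PORT B =====
-- the generator's filter: d.get("Decision", "").strip().upper() in APPROVED_REVIEW_DECISIONS
def pvApprovedDecision (d : PySem.Dict String String) : Bool :=
  (["ALLOW", "APPROVE", "APPROVED"] : PySem.Set String).contains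
    (PySem.Str.upper (PySem.Str.strip (d.getD "Decision" "")))

-- the generator's (key, rule) pair for one approved decision
def pvRuleOf (d : PySem.Dict String String) : String × (String × String) :=
  (pvNormalizeMatchField (d.getD "Name" ""),
   (pvNormalizeMatchField (d.getD "Version" ""), pvNormalizeMatchField (d.getD "License" "")))

-- (not rv or rv == ver) and (not rl or rl == lic)
def pvRuleMatches (ver lic : String) (rl : String × String) : Bool :=
  (rl.1 == "" || rl.1 == ver) && (rl.2 == "" || rl.2 == lic)

-- stage 1 builds the name-indexed rules dict (setdefault(...).append = modify with default []),
-- stage 2 partitions the rows consulting only the row's own bucket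
def resolve_review_rows_alt (review_rows : List (List (String × String))) (review_decisions : List (List (String × String))) : (List (List (String × String))) × (List (List (String × String))) :=
  let rows := review_rows.map PySem.Dict.ofList
  let decisions := review_decisions.map PySem.Dict.ofList
  let rules : PySem.Dict String (List (String × String)) :=
    ((decisions.filter pvApprovedDecision).map pvRuleOf).foldl
      (fun r p => r.modify p.1 [] (· ++ [p.2])) PySem.Dict.empty
  rows.foldl
    (fun (st : List (List (String × String)) × List (List (String × String))) row =>
      let ver := pvNormalizeMatchField (row.getD "Version" "")
      let lic := pvNormalizeMatchField (row.getD "License" "")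
      if ((rules.getD (pvNormalizeMatchField (row.getD "Name" "")) []).any (pvRuleMatches ver lic)) then
        (st.1 ++ [row.items], st.2)
      else
        (st.1, st.2 ++ [row.items]))
    ([], [])

-- ===== PRECONDITION & SPEC =====
def Spec_resolve_review_rows (review_rows : List (List (String × String))) (review_decisions : List (List (String × String))) (out : (List (List (String × String))) × (List (List (String × String)))) : Prop := out = resolve_review_rows_alt review_rows review_decisions
instance (review_rows : List (List (String × String))) (review_decisions : List (List (String × String))) (out : (List (List (String × String))) × (List (List (String × String)))) : Decidable (Spec_resolve_review_rows review_rows review_decisions out) := by unfold Spec_resolve_review_rows; infer_instance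

-- ===== CLAIM (what is proved, stated in full; the proofs are below) =====
def Claim_equal_resolve_review_rows : Prop := ∀ (review_rows : List (List (String × String))) (review_decisions : List (List (String × String))), Dom_resolve_review_rows review_rows review_decisions → Spec_resolve_review_rows review_rows review_decisions (resolve_review_rows review_rows review_decisions)

-- ===== LEMMAS AND PROOFS =====

-- per decision: A's step-by-step predicate is B's "approved, name matches, rule matches" conjunction
theorem matches_decomp (d row : PySem.Dict String String) :
    pvDecisionMatchesReview d row
      = (pvApprovedDecision d
          && ((pvRuleOf d).1 == pvNormalizeMatchField (row.getD "Name" ""))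
          && pvRuleMatches (pvNormalizeMatchField (row.getD "Version" ""))
               (pvNormalizeMatchField (row.getD "License" "")) (pvRuleOf d).2) := by
  simp only [pvDecisionMatchesReview, pvApprovedDecision, pvRuleOf, pvRuleMatches, bne]
  by_cases h1 : pvNormalizeMatchField (d.getD "Name" "") = pvNormalizeMatchField (row.getD "Name" "") <;>
    by_cases h2 : pvNormalizeMatchField (d.getD "Version" "") = "" <;>
      by_cases h3 : pvNormalizeMatchField (d.getD "Version" "") = pvNormalizeMatchField (row.getD "Version" "") <;>
        by_cases h4 : pvNormalizeMatchField (d.getD "License" "") = "" <;>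
          by_cases h5 : pvNormalizeMatchField (d.getD "License" "") = pvNormalizeMatchField (row.getD "License" "") <;>
            simp [h1, h2, h3, h4, h5]

-- for each row, B's bucket lookup decides exactly A's any() over all decisions
theorem bucket_eq_any (decisions : List (PySem.Dict String String)) (row : PySem.Dict String String) :
    ((((decisions.filter pvApprovedDecision).map pvRuleOf).foldl
        (fun r p => r.modify p.1 [] (· ++ [p.2])) PySem.Dict.empty).getD
          (pvNormalizeMatchField (row.getD "Name" "")) []).any
        (pvRuleMatches (pvNormalizeMatchField (row.getD "Version" ""))
          (pvNormalizeMatchField (row.getD "License" "")))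
      = decisions.any (fun decision => pvDecisionMatchesReview decision row) := by
  rw [PySem.Dict.getD_foldl_modify_append]
  simp only [PySem.Dict.getD_empty, List.nil_append, List.map_map, List.filter_map,
    List.any_map, List.any_filter, Function.comp]
  apply congrArg (List.any decisions) ∘ funext
  intro d
  rw [matches_decomp d row]
  cases pvApprovedDecision d <;>
    cases h : ((pvRuleOf d).1 == pvNormalizeMatchField (row.getD "Name" "")) <;> simp_all

-- ===== VERDICT (by name: the statement is the Claim_ definition above) =====
theorem resolve_review_rows_spec : Claim_equal_resolve_review_rows := by
  intro review_rows review_decisions _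
  unfold Spec_resolve_review_rows resolve_review_rows resolve_review_rows_alt
  dsimp only
  congr 1
  funext st row
  rw [bucket_eq_any]
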